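-- pv_equiv track=rewrite | github.com/vasamoylov/My_works | task_dop.py | calculate_dict
-- ===== SOURCE A (Python) =====
-- def calculate_dict(dict_):
--     summa_d = int()
--     list_key = dict_.keys()
--     for key in list_key:
--         if type(key) == int:
--             summa_d = summa_d + int(key)
--         elif type(key) == str:
--             summa_d = summa_d + len(key)
--     list_value = dict_.values()
--     for value in list_value:
--         if type(value) == int:
--             summa_d = summa_d + int(value)
--         elif type(value) == str:
--             summa_d = summa_d + len(value)
--     return summa_d
-- ===== SOURCE B (Python) =====
-- def _contrib(x):
--     if type(x) == int:
--         return x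
--     if type(x) == str:
--         return len(x)
--     return 0
--
-- def calculate_dict(dict_):
--     return sum(_contrib(k) + _contrib(v) for k, v in dict_.items())
-- ===== Notes on version B (the rewrite author's own statement) =====
-- stated objective: simpler
-- what changed: Replaces the two sequential hand-inlined loops over keys() and values() with a single factored contribution helper summed over items() in one pass.
import Mathlib
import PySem

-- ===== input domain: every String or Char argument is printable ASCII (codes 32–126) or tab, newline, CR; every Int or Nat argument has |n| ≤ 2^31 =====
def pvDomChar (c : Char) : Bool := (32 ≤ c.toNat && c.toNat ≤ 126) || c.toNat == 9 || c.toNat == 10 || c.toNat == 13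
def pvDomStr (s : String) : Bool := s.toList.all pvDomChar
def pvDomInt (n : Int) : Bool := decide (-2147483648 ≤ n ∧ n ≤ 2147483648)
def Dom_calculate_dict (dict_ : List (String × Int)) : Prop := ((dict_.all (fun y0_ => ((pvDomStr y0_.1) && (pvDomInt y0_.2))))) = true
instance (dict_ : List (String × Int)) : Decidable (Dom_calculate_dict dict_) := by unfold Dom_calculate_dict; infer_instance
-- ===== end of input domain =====

-- B replaces A's two sequential loops over keys then values by one pass over
-- the items with a factored per-element contribution helper (objective: simpler).


-- ===== PORT A =====
-- A: accumulator starts at 0, first loop over keys (strings: the str branch adds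
-- len(key); the int branch cannot fire for a String key), then a second loop over
-- values (ints: the int branch adds the value; the str branch cannot fire).
def calculate_dict (dict_ : List (String × Int)) : Int :=
  let summa_d : Int := 0
  let summa_d := dict_.foldl (fun s kv => s + PySem.Str.len kv.1) summa_d
  let summa_d := dict_.foldl (fun s kv => s + kv.2) summa_d
  summa_d

-- ===== PORT B =====
-- _contrib on a String key: the str branch returns len; on an Int value: the int
-- branch returns the value itself (exact type() dispatch is static here).
def contribKey (k : String) : Int := PySem.Str.len k
def contribVal (v : Int) : Int := v
def calculate_dict_alt (dict_ : List (String × Int)) : Int :=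
  (dict_.map (fun kv => contribKey kv.1 + contribVal kv.2)).sum

-- ===== PRECONDITION & SPEC =====
def Spec_calculate_dict (dict_ : List (String × Int)) (out : Int) : Prop := out = calculate_dict_alt dict_
instance (dict_ : List (String × Int)) (out : Int) : Decidable (Spec_calculate_dict dict_ out) := by unfold Spec_calculate_dict; infer_instance

-- ===== CLAIM (what is proved, stated in full; the proofs are below) =====
def Claim_equal_calculate_dict : Prop := ∀ (dict_ : List (String × Int)), Dom_calculate_dict dict_ → Spec_calculate_dict dict_ (calculate_dict dict_)

-- ===== LEMMAS AND PROOFS =====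
theorem foldl_add_map (f : String × Int → Int) (l : List (String × Int)) (a : Int) :
    l.foldl (fun s kv => s + f kv) a = a + (l.map f).sum := by
  induction l generalizing a with
  | nil => simp
  | cons x xs ih => simp [ih, add_assoc]

-- ===== VERDICT (by name: the statement is the Claim_ definition above) =====
theorem calculate_dict_spec : Claim_equal_calculate_dict := by
  intro d _
  unfold Spec_calculate_dict calculate_dict calculate_dict_alt contribKey contribVal
  simp only [foldl_add_map]
  induction d with
  | nil => simp
  | cons x xs ih => simp_all; omega
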